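-- pv_equiv track=rewrite | github.com/HarryVTripathi/CP0-aegis | Py/BoringStringPermutations.py | solve
-- ===== SOURCE A (Python) =====
-- def solve(A):
--     arr = [ord(x) for x in A if x != ""]
--     dist = list(set(arr))
--     dist.sort()
--     ans = 0
--
--     if len(dist) < 4:
--         for i in range(1, len(dist)):
--             if dist[i] - dist[i-1] == 1:
--                 pass
--             else:
--                 ans = 1
--     else:
--         ans = 1
--
--     return ans
-- ===== SOURCE B (Python) =====
-- def solve(A):
--     dist = {ord(x) for x in A}
--     k = len(dist)
--     if k < 4 and (k <= 1 or max(dist) - min(dist) == k - 1):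
--         return 0
--     return 1
-- ===== Notes on version B (the rewrite author's own statement) =====
-- stated objective: simpler
-- what changed: Replaces the sort-then-adjacent-gap scan over the distinct codes with a closed-form test: the distinct codes are consecutive iff max - min equals their count minus 1.
import Mathlib
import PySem

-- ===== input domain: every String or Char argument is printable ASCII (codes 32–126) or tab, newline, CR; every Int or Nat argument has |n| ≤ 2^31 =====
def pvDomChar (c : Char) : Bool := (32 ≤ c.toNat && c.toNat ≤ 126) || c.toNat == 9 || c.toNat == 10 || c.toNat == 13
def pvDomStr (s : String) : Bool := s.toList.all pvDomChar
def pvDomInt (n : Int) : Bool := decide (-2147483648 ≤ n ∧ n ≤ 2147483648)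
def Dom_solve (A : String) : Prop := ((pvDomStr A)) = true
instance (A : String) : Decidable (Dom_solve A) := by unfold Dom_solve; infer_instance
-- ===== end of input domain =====

-- B replaces A's sort + adjacent-gap scan of the distinct codes with the closed-form
-- test max - min = count - 1 (simpler; same exact result).


-- ===== PORT A =====
-- 'if x != ""' compares the one-char string x with "", which is always true; ported literally.
def solve (A : String) : Int :=
  let arr := (A.toList.filter (fun x => String.ofList [x] != "")).map (fun c => (c.toNat : Int))
  let dist := PySem.List.sorted (PySem.Set.ofList arr) (fun x => x) false
  let ans : Int := 0
  if dist.length < 4 then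
    (PySem.List.pyRange 1 dist.length 1).foldl
      (fun ans i =>
        if PySem.List.pyGetD dist i 0 - PySem.List.pyGetD dist (i - 1) 0 = 1 then ans else 1)
      ans
  else 1

-- ===== PORT B =====
def solve_alt (A : String) : Int :=
  let dist := PySem.Set.ofList (A.toList.map (fun c => (c.toNat : Int)))
  let k := PySem.List.len dist
  if k < 4 ∧ (k ≤ 1 ∨
      (PySem.List.max? dist (fun x => x)).getD 0 - (PySem.List.min? dist (fun x => x)).getD 0 = k - 1)
  then 0 else 1

-- ===== PRECONDITION & SPEC =====
def Spec_solve (A : String) (out : Int) : Prop := out = solve_alt A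
instance (A : String) (out : Int) : Decidable (Spec_solve A out) := by unfold Spec_solve; infer_instance

-- ===== CLAIM (what is proved, stated in full; the proofs are below) =====
def Claim_equal_solve : Prop := ∀ (A : String), Dom_solve A → Spec_solve A (solve A)

-- ===== LEMMAS AND PROOFS =====

theorem pv_filter_id (l : List Char) :
    l.filter (fun x => String.ofList [x] != "") = l := by
  apply List.filter_eq_self.mpr
  intro a _
  have hne : String.ofList [a] ≠ "" := by
    intro h
    have := congrArg String.toList h
    simp at this
  simp [bne_iff_ne, hne]

theorem pv_min_eq_head {l : List Int} {a : Int} {t : List Int}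
    (hperm : (a :: t).Perm l) (hlt : (a :: t).Pairwise (· < ·)) :
    PySem.List.min? l (fun x => x) = some a := by
  have hne : l ≠ [] := by
    intro h; subst h; exact absurd hperm.symm (by simp)
  obtain ⟨m, hm⟩ : ∃ m, PySem.List.min? l (fun x => x) = some m := by
    cases hmin : PySem.List.min? l (fun x => x) with
    | none => exact absurd ((PySem.List.min?_eq_none_iff l (fun x => x)).mp hmin) hne
    | some m => exact ⟨m, rfl⟩
  have hml : m ∈ l := PySem.List.min?_mem hm
  have hmem : m ∈ a :: t := hperm.symm.mem_iff.mp hml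
  have hle : m ≤ a := PySem.List.min?_isMin hm a (hperm.mem_iff.mp (by simp))
  cases hmem with
  | head => exact hm
  | tail _ h =>
    have := (List.pairwise_cons.mp hlt).1 m h
    omega

theorem pv_max_eq_last {l s : List Int} {a : Int}
    (hperm : s.Perm l) (hmaxs : ∀ y ∈ s, y ≤ a) (ha : a ∈ s) :
    PySem.List.max? l (fun x => x) = some a := by
  have hne : l ≠ [] := by
    intro h; subst h
    exact absurd (hperm.mem_iff.mp ha) (by simp)
  obtain ⟨m, hm⟩ : ∃ m, PySem.List.max? l (fun x => x) = some m := by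
    cases hmax : PySem.List.max? l (fun x => x) with
    | none => exact absurd ((PySem.List.max?_eq_none_iff l (fun x => x)).mp hmax) hne
    | some m => exact ⟨m, rfl⟩
  have hml : m ∈ l := PySem.List.max?_mem hm
  have hge : a ≤ m := PySem.List.max?_isMax hm a (hperm.mem_iff.mp ha)
  have hle : m ≤ a := hmaxs m (hperm.symm.mem_iff.mp hml)
  rw [hm]; congr 1; omega

theorem solve_spec : Claim_equal_solve := by
  intro A _
  unfold Spec_solve
  simp only [solve, solve_alt]
  rw [pv_filter_id]
  generalize harr : A.toList.map (fun c => ((c.toNat : Int))) = arr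
  generalize hd : PySem.Set.ofList arr = d
  have hperm0 : (PySem.List.sorted d (fun x => x) false).Perm d :=
    PySem.List.sorted_perm d (fun x => x) false
  have hlt0 : (PySem.List.sorted d (fun x => x) false).Pairwise (· < ·) := by
    rw [← hd]; exact PySem.List.sorted_ofList_pairwise_lt arr
  revert hperm0 hlt0
  generalize hs : PySem.List.sorted d (fun x => x) false = s
  intro hperm hlt
  have hlen : PySem.List.len d = (s.length : Int) := by
    simp [PySem.List.len_eq, hperm.length_eq]
  rcases s with _ | ⟨a, _ | ⟨b, _ | ⟨c, _ | ⟨e, t⟩⟩⟩⟩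
  · have hdnil : d = [] := hperm.symm.eq_nil
    simp [hdnil, PySem.List.pyRange]
  · rw [hlen]
    simp [PySem.List.pyRange]
  · have hab : a < b := (List.pairwise_cons.mp hlt).1 b (by simp)
    have hmin : PySem.List.min? d (fun x => x) = some a := pv_min_eq_head hperm hlt
    have hmax : PySem.List.max? d (fun x => x) = some b := by
      refine pv_max_eq_last hperm ?_ (by simp)
      intro y hy
      simp at hy
      rcases hy with h | h <;> omega
    rw [hlen, hmin, hmax]
    by_cases h : b - a = 1 <;>
      norm_num [PySem.List.pyRange, PySem.List.pyGetD, PySem.List.pyIdx?, PySem.List.pyGet?,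
        List.range_succ, h]
  · have hab : a < b := (List.pairwise_cons.mp hlt).1 b (by simp)
    have hbc : b < c :=
      (List.pairwise_cons.mp (List.pairwise_cons.mp hlt).2).1 c (by simp)
    have hmin : PySem.List.min? d (fun x => x) = some a := pv_min_eq_head hperm hlt
    have hmax : PySem.List.max? d (fun x => x) = some c := by
      refine pv_max_eq_last hperm ?_ (by simp)
      intro y hy
      simp at hy
      rcases hy with h | h | h <;> omega
    rw [hlen, hmin, hmax]
    have hr : PySem.List.pyRange 1 ((3 : Nat) : Int) 1 = [1, 2] := by decide
    have g1 : PySem.List.pyGetD [a, b, c] 1 0 = b := by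
      norm_num [PySem.List.pyGetD, PySem.List.pyIdx?, PySem.List.pyGet?]
    have g0 : PySem.List.pyGetD [a, b, c] (1 - 1) 0 = a := by
      norm_num [PySem.List.pyGetD, PySem.List.pyIdx?, PySem.List.pyGet?]
    have g2 : PySem.List.pyGetD [a, b, c] 2 0 = c := by
      norm_num [PySem.List.pyGetD, PySem.List.pyIdx?, PySem.List.pyGet?]; rfl
    have g21 : PySem.List.pyGetD [a, b, c] (2 - 1) 0 = b := by
      norm_num [PySem.List.pyGetD, PySem.List.pyIdx?, PySem.List.pyGet?]
    simp only [List.length_cons, List.length_nil]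
    rw [hr]
    simp only [List.foldl_cons, List.foldl_nil, g1, g0, g2, g21]
    by_cases h1 : b - a = 1 <;> by_cases h2 : c - b = 1 <;> simp [h1, h2] <;> omega
  · rw [hlen]
    simp only [List.length_cons]
    split_ifs with h1 h2 <;> first | rfl | (exfalso; omega)
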